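-- pv_equiv track=rewrite | github.com/collinsakenga/codewars_solutions | 6 kyu/Ragbaby cipher.py | helper
-- ===== SOURCE A (Python) =====
-- from collections import Counter
--
-- def helper(text, key, flag):
--     dict={j:i for i,j in enumerate(Counter(key+"abcdefghijklmnopqrstuvwxyz").keys())}
--     dict2={v:k for k,v in dict.items()}
--     res=""
--     count=0
--     for k in text:
--         if k.lower() in dict:
--             count+=1
--             index=(dict[k.lower()]+(count if flag else -count))%26
--             res+=dict2[index].upper() if k.isupper() else dict2[index].lower()
--         else:
--             res+=k
--             count=0
--     return res
-- ===== SOURCE B (Python) =====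
-- def helper(text, key, flag):
--     # Keyed alphabet kept as a LIST (first occurrences of key+alphabet);
--     # lookups by list.index, run-splitting instead of a count-reset state machine.
--     alpha = []
--     for ch in key + "abcdefghijklmnopqrstuvwxyz":
--         if ch not in alpha:
--             alpha.append(ch)
--
--     def shift_run(run):
--         for pos, c in enumerate(run, 1):
--             i = alpha.index(c.lower())
--             t = alpha[(i + (pos if flag else -pos)) % 26]
--             yield t.upper() if c.isupper() else t.lower()
--
--     out = []
--     i, n = 0, len(text)
--     while i < n:
--         j = i
--         if text[i].lower() in alpha:
--             while j < n and text[j].lower() in alpha: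
--                 j += 1
--             out.extend(shift_run(text[i:j]))
--         else:
--             while j < n and text[j].lower() not in alpha:
--                 j += 1
--             out.append(text[i:j])
--         i = j
--     return "".join(out)
-- ===== Notes on version B (the rewrite author's own statement) =====
-- stated objective: alternative
-- what changed: B replaces A's dict/inverse-dict pair and count-resetting single-pass state machine by a keyed-alphabet list (built by first-occurrence dedup, looked up with list.index) and an explicit split of the text into maximal letter/non-letter runs, shifting each letter-run's characters by their 1-based position within the run.
import Mathlib
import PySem

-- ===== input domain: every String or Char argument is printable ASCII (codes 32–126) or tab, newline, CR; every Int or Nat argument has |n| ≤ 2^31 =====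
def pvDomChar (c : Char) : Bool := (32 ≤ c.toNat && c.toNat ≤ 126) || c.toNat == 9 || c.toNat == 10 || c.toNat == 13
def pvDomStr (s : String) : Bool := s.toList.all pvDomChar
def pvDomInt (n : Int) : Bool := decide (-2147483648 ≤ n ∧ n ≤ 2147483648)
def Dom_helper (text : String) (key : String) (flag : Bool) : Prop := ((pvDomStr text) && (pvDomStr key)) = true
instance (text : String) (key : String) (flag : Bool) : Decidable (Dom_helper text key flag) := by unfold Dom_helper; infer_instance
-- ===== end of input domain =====

-- B replaces A's count-reset state machine and dict pair by a keyed-alphabet LIST with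
-- run-splitting (maximal letter/non-letter runs, 1-based enumerate); objective: alternative.

-- ===== PORT A =====
def helper (text : String) (key : String) (flag : Bool) : String :=
  let d : PySem.Dict Char Int :=
    PySem.Dict.ofList ((PySem.List.enumerate
      (PySem.Dict.keys (PySem.Dict.counter (key.toList ++ "abcdefghijklmnopqrstuvwxyz".toList)))).map
      (fun p => (p.2, p.1)))
  let d2 : PySem.Dict Int Char := PySem.Dict.ofList (d.items.map (fun p => (p.2, p.1)))
  let st := text.toList.foldl (fun (st : List Char × Int) k =>
      if d.contains (PySem.Chars.lowerChar k) then
        let count := st.2 + 1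
        let index := PySem.Int.mod ((d.get? (PySem.Chars.lowerChar k)).getD 0 +
                        (if flag then count else -count)) 26
        let c := (d2.get? index).getD ' '
        (st.1 ++ [if PySem.Chars.isupper k then PySem.Chars.upperChar c else PySem.Chars.lowerChar c],
         count)
      else (st.1 ++ [k], (0 : Int))) ([], (0 : Int))
  String.mk st.1

-- ===== PORT B =====
-- termination helper for altRuns (cited by its decreasing_by)
theorem pvDropWhileLt {p : Char → Bool} {c : Char} {cs : List Char} (h : p c = true) :
    ((c :: cs).dropWhile p).length < (c :: cs).length := by
  simp only [List.dropWhile_cons, h, if_true, List.length_cons]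
  exact Nat.lt_succ_of_le (List.length_dropWhile_le p cs)

def altAlpha (key : String) : List Char :=
  (key.toList ++ "abcdefghijklmnopqrstuvwxyz".toList).foldl
    (fun al ch => if ch ∈ al then al else al ++ [ch]) []

def altEncChar (alpha : List Char) (flag : Bool) (pos : Int) (c : Char) : Char :=
  let i : Int := ((PySem.List.index? alpha (PySem.Chars.lowerChar c)).getD 0 : Nat)
  let t := (PySem.List.pyGet? alpha (PySem.Int.mod (i + (if flag then pos else -pos)) 26)).getD ' '
  if PySem.Chars.isupper c then PySem.Chars.upperChar t else PySem.Chars.lowerChar t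

def altShiftRun (alpha : List Char) (flag : Bool) (run : List Char) : List Char :=
  (PySem.List.enumerate run 1).map (fun q => altEncChar alpha flag q.1 q.2)

def altRuns (alpha : List Char) (flag : Bool) : List Char → List Char
  | [] => []
  | c :: cs =>
    if h : alpha.contains (PySem.Chars.lowerChar c) then
      altShiftRun alpha flag ((c :: cs).takeWhile (fun x => alpha.contains (PySem.Chars.lowerChar x)))
        ++ altRuns alpha flag ((c :: cs).dropWhile (fun x => alpha.contains (PySem.Chars.lowerChar x)))
    else
      (c :: cs).takeWhile (fun x => !alpha.contains (PySem.Chars.lowerChar x))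
        ++ altRuns alpha flag ((c :: cs).dropWhile (fun x => !alpha.contains (PySem.Chars.lowerChar x)))
termination_by l => l.length
decreasing_by
  · exact pvDropWhileLt h
  · exact pvDropWhileLt (by simpa using h)

def helper_alt (text : String) (key : String) (flag : Bool) : String :=
  String.mk (altRuns (altAlpha key) flag text.toList)

-- ===== PRECONDITION & SPEC =====
def Spec_helper (text : String) (key : String) (flag : Bool) (out : String) : Prop := out = helper_alt text key flag
instance (text : String) (key : String) (flag : Bool) (out : String) : Decidable (Spec_helper text key flag out) := by unfold Spec_helper; infer_instance

-- ===== CLAIM (what is proved, stated in full; the proofs are below) =====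
def Claim_equal_helper : Prop := ∀ (text : String) (key : String) (flag : Bool), Dom_helper text key flag → Spec_helper text key flag (helper text key flag)

-- ===== LEMMAS AND PROOFS =====

-- A's two dictionaries, named (definitionally the ones helper builds)
def pvDA (key : String) : PySem.Dict Char Int :=
  PySem.Dict.ofList ((PySem.List.enumerate
    (PySem.Dict.keys (PySem.Dict.counter (key.toList ++ "abcdefghijklmnopqrstuvwxyz".toList)))).map
    (fun p => (p.2, p.1)))

def pvD2 (key : String) : PySem.Dict Int Char :=
  PySem.Dict.ofList ((pvDA key).items.map (fun p => (p.2, p.1)))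

-- A's per-letter encoded character, named
def pvFA (d : PySem.Dict Char Int) (d2 : PySem.Dict Int Char) (flag : Bool) (k : Char) (cnt : Int) : Char :=
  let index := PySem.Int.mod ((d.get? (PySem.Chars.lowerChar k)).getD 0 +
                  (if flag then cnt else -cnt)) 26
  let c := (d2.get? index).getD ' '
  if PySem.Chars.isupper k then PySem.Chars.upperChar c else PySem.Chars.lowerChar c

-- A's loop as a structural recursion on the text with the running count
def pvGoA (p : Char → Bool) (f : Char → Int → Char) : List Char → Int → List Char
  | [], _ => []
  | c :: cs, cnt => if p c then f c (cnt + 1) :: pvGoA p f cs (cnt + 1) else c :: pvGoA p f cs 0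

theorem pvFoldA (d : PySem.Dict Char Int) (d2 : PySem.Dict Int Char) (flag : Bool)
    (lst : List Char) : ∀ (res : List Char) (cnt : Int),
    (lst.foldl (fun (st : List Char × Int) k =>
      if d.contains (PySem.Chars.lowerChar k) then
        (st.1 ++ [pvFA d d2 flag k (st.2 + 1)], st.2 + 1)
      else (st.1 ++ [k], (0 : Int))) (res, cnt)).1
    = res ++ pvGoA (fun k => d.contains (PySem.Chars.lowerChar k)) (pvFA d d2 flag) lst cnt := by
  induction lst with
  | nil => intro res cnt; simp [pvGoA]
  | cons c cs ih =>
    intro res cnt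
    by_cases h : d.contains (PySem.Chars.lowerChar c)
    · simp only [List.foldl_cons, h, if_true, pvGoA, ih]
      simp
    · simp only [List.foldl_cons, h, if_false, pvGoA, ih]
      simp [h]

theorem pvHelperEq (text : String) (key : String) (flag : Bool) :
    helper text key flag =
    String.mk ([] ++ pvGoA (fun k => (pvDA key).contains (PySem.Chars.lowerChar k))
      (pvFA (pvDA key) (pvD2 key) flag) text.toList 0) :=
  congrArg String.mk (pvFoldA (pvDA key) (pvD2 key) flag text.toList [] 0)

-- the keyed alphabet, as deduplication
theorem pvAlphaEq (key : String) :
    altAlpha key = PySem.Set.ofList (key.toList ++ "abcdefghijklmnopqrstuvwxyz".toList) := by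
  have h : (fun (al : List Char) (ch : Char) => if ch ∈ al then al else al ++ [ch]) = PySem.Set.add := by
    funext al ch; simp [PySem.Set.add, PySem.Set.contains]
  unfold altAlpha
  rw [h, ← PySem.Set.ofList_eq_foldl]

-- generic dictionary-of-enumerate facts, for a Nodup alphabet al
def pvDGen (al : List Char) : PySem.Dict Char Int :=
  PySem.Dict.ofList ((PySem.List.enumerate al).map (fun p => (p.2, p.1)))

theorem pvDAEq (key : String) :
    pvDA key = pvDGen (PySem.Set.ofList (key.toList ++ "abcdefghijklmnopqrstuvwxyz".toList)) := by
  unfold pvDA pvDGen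
  rw [PySem.Dict.keys_counter]

theorem pvItemsDGen (al : List Char) (hnd : al.Nodup) :
    (pvDGen al).items = (PySem.List.enumerate al).map (fun p => (p.2, p.1)) := by
  unfold pvDGen PySem.Dict.ofList PySem.Dict.update
  have h1 : ∀ a ∈ (PySem.List.enumerate al).map (fun (p : Int × Char) => (p.2, p.1)),
      (PySem.Dict.empty : PySem.Dict Char Int).contains ((fun (p : Char × Int) => p.1) a) = false := by
    intro a _; exact PySem.Dict.contains_empty _
  have h2 : (((PySem.List.enumerate al).map (fun (p : Int × Char) => (p.2, p.1))).map
      (fun (p : Char × Int) => p.1)).Nodup := by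
    simpa [List.map_map, Function.comp_def] using hnd
  have h3 := PySem.Dict.items_foldl_insert_fresh
    ((PySem.List.enumerate al).map (fun (p : Int × Char) => (p.2, p.1)))
    (fun p => p.1) (fun p => p.2) PySem.Dict.empty h1 h2
  simpa [show PySem.Dict.empty.items = ([] : List (Char × Int)) from rfl] using h3

theorem pvKeysDGen (al : List Char) (hnd : al.Nodup) : (pvDGen al).keys = al := by
  simp only [PySem.Dict.keys, pvItemsDGen al hnd]
  simp [List.map_map, Function.comp_def, PySem.List.map_snd_enumerate]

theorem pvGetDGen (al : List Char) (hnd : al.Nodup) (c : Char) :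
    (pvDGen al).get? c = (PySem.List.index? al c).map (fun n => ((n : Nat) : Int)) := by
  by_cases hc : c ∈ al
  · obtain ⟨k, hk⟩ := Option.isSome_iff_exists.mp ((PySem.List.index?_isSome_iff al c).mpr hc)
    obtain ⟨hklt, hak, _⟩ := PySem.List.getElem_of_index?_eq_some hk
    have hmem : (c, ((k : Nat) : Int)) ∈ (pvDGen al).items := by
      rw [pvItemsDGen al hnd]
      refine List.mem_map.mpr ⟨((k : Nat), c), ?_, rfl⟩
      rw [PySem.List.mem_enumerate_iff]
      exact ⟨k, hklt, by simp [hak]⟩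
    have hknd : (pvDGen al).keys.Nodup := by rw [pvKeysDGen al hnd]; exact hnd
    rw [PySem.Dict.get?_of_mem_items (pvDGen al) hmem hknd, hk]
    rfl
  · have hcontains : (pvDGen al).contains c = false := by
      rw [PySem.Dict.contains_eq_decide_mem_keys, pvKeysDGen al hnd]
      simp [hc]
    rw [(PySem.Dict.get?_eq_none_iff_contains (pvDGen al) c).mpr hcontains,
      (PySem.List.index?_eq_none_iff al c).mpr hc]
    rfl

theorem pvContainsDGen (al : List Char) (hnd : al.Nodup) (c : Char) :
    (pvDGen al).contains c = al.contains c := by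
  rw [PySem.Dict.contains_eq_decide_mem_keys, pvKeysDGen al hnd]
  by_cases h : c ∈ al <;> simp [h]

-- the inverse dictionary
theorem pvD2Eq (key : String) :
    pvD2 key = PySem.Dict.ofList (PySem.List.enumerate
      (PySem.Set.ofList (key.toList ++ "abcdefghijklmnopqrstuvwxyz".toList))) := by
  unfold pvD2
  rw [pvDAEq]
  set al : List Char := PySem.Set.ofList (key.toList ++ "abcdefghijklmnopqrstuvwxyz".toList) with hal
  rw [pvItemsDGen al (by rw [hal]; exact PySem.Set.nodup_ofList _)]
  simp [List.map_map, Function.comp_def]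

theorem pvNodupEnumFst (al : List Char) : ((PySem.List.enumerate al).map (fun p => p.1)).Nodup := by
  rw [List.nodup_iff_pairwise_ne, List.pairwise_map]
  exact (PySem.List.pairwise_lt_enumerate al 0).imp (fun h => ne_of_lt h)

theorem pvGetD2 (al : List Char) (n : Int) (h0 : 0 ≤ n) (hlt : n.toNat < al.length) :
    (PySem.Dict.ofList (PySem.List.enumerate al)).get? n = some al[n.toNat] := by
  unfold PySem.Dict.ofList PySem.Dict.update
  have hnodup : ((PySem.List.enumerate al).map (fun p => p.1)).Nodup := pvNodupEnumFst al
  have hitems : (List.foldl (fun acc p => acc.insert p.1 p.2) PySem.Dict.empty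
      (PySem.List.enumerate al)).items = (PySem.List.enumerate al).map (fun p => (p.1, p.2)) := by
    have h3 := PySem.Dict.items_foldl_insert_fresh (PySem.List.enumerate al) (fun p => p.1)
      (fun p => p.2) PySem.Dict.empty (by intro a _; exact PySem.Dict.contains_empty _) hnodup
    simpa [show PySem.Dict.empty.items = ([] : List (Int × Char)) from rfl] using h3
  have hmem : (n, al[n.toNat]) ∈ (List.foldl (fun acc p => acc.insert p.1 p.2) PySem.Dict.empty
      (PySem.List.enumerate al)).items := by
    rw [hitems]
    refine List.mem_map.mpr ⟨(n, al[n.toNat]), ?_, rfl⟩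
    rw [PySem.List.mem_enumerate_iff]
    exact ⟨n.toNat, hlt, by simp [Int.toNat_of_nonneg h0]⟩
  refine PySem.Dict.get?_of_mem_items _ hmem ?_
  have : (List.foldl (fun acc p => acc.insert p.1 p.2) PySem.Dict.empty
      (PySem.List.enumerate al)).keys = (PySem.List.enumerate al).map (fun p => p.1) := by
    simp only [PySem.Dict.keys, hitems, List.map_map]
    rfl
  rw [this]
  exact hnodup

-- the two per-letter encoders agree
theorem pvEncEq (key : String) (flag : Bool) :
    pvFA (pvDA key) (pvD2 key) flag =
    (fun c cnt => altEncChar (PySem.Set.ofList (key.toList ++ "abcdefghijklmnopqrstuvwxyz".toList)) flag cnt c) := by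
  funext c cnt
  set al : List Char := PySem.Set.ofList (key.toList ++ "abcdefghijklmnopqrstuvwxyz".toList) with hal
  have hnd : al.Nodup := by rw [hal]; exact PySem.Set.nodup_ofList _
  have h26 : 26 ≤ al.length := by
    have hsub : "abcdefghijklmnopqrstuvwxyz".toList ⊆ al := by
      intro x hx
      rw [hal, PySem.Set.mem_ofList]
      exact List.mem_append_right _ hx
    have hnodlet : ("abcdefghijklmnopqrstuvwxyz".toList).Nodup := by decide
    simpa using (List.subperm_of_subset hnodlet hsub).length_le
  show (if PySem.Chars.isupper c then
      PySem.Chars.upperChar (((pvD2 key).get? (PySem.Int.mod (((pvDA key).get? (PySem.Chars.lowerChar c)).getD 0 +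
        (if flag then cnt else -cnt)) 26)).getD ' ')
    else
      PySem.Chars.lowerChar (((pvD2 key).get? (PySem.Int.mod (((pvDA key).get? (PySem.Chars.lowerChar c)).getD 0 +
        (if flag then cnt else -cnt)) 26)).getD ' ')) =
    (if PySem.Chars.isupper c then
      PySem.Chars.upperChar ((PySem.List.pyGet? al (PySem.Int.mod ((((PySem.List.index? al (PySem.Chars.lowerChar c)).getD 0 : Nat) : Int) +
        (if flag then cnt else -cnt)) 26)).getD ' ')
    else
      PySem.Chars.lowerChar ((PySem.List.pyGet? al (PySem.Int.mod ((((PySem.List.index? al (PySem.Chars.lowerChar c)).getD 0 : Nat) : Int) +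
        (if flag then cnt else -cnt)) 26)).getD ' '))
  rw [pvDAEq, ← hal, pvGetDGen al hnd, pvD2Eq, ← hal]
  have hsame : ((PySem.List.index? al (PySem.Chars.lowerChar c)).map (fun n => ((n : Nat) : Int))).getD 0
      = (((PySem.List.index? al (PySem.Chars.lowerChar c)).getD 0 : Nat) : Int) := by
    cases PySem.List.index? al (PySem.Chars.lowerChar c) <;> simp
  rw [hsame]
  set m := PySem.Int.mod ((((PySem.List.index? al (PySem.Chars.lowerChar c)).getD 0 : Nat) : Int)
    + (if flag = true then cnt else -cnt)) 26 with hm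
  have hm0 : 0 ≤ m := PySem.Int.mod_nonneg _ (by norm_num)
  have hmlt : m < 26 := PySem.Int.mod_lt _ (by norm_num)
  have hmn : m.toNat < al.length := by omega
  rw [pvGetD2 al m hm0 hmn]
  have hget : PySem.List.pyGet? al m = some al[m.toNat] := by
    have hcast := PySem.List.pyGet?_natCast al m.toNat
    rw [Int.toNat_of_nonneg hm0] at hcast
    rw [hcast, List.getElem?_eq_getElem hmn]
  rw [hget]

-- B's run decomposition computes A's loop (with count reset on non-letters)
def pvMapShift (f : Char → Int → Char) : List Char → Int → List Char
  | [], _ => []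
  | c :: cs, cnt => f c (cnt + 1) :: pvMapShift f cs (cnt + 1)

theorem pvMapShiftEnum (f : Char → Int → Char) (run : List Char) : ∀ cnt : Int,
    pvMapShift f run cnt = (PySem.List.enumerate run (cnt + 1)).map (fun q => f q.2 q.1) := by
  induction run with
  | nil => intro cnt; simp [pvMapShift, PySem.List.enumerate_nil]
  | cons c cs ih =>
    intro cnt
    rw [PySem.List.enumerate_cons]
    simp only [pvMapShift, List.map_cons, ih (cnt + 1)]

theorem pvGoARun (p : Char → Bool) (f : Char → Int → Char) (run : List Char) :
    ∀ (rest : List Char) (cnt : Int), (∀ x ∈ run, p x = true) →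
    pvGoA p f (run ++ rest) cnt = pvMapShift f run cnt ++ pvGoA p f rest (cnt + run.length) := by
  induction run with
  | nil => intro rest cnt _; simp [pvMapShift]
  | cons c cs ih =>
    intro rest cnt hall
    simp only [List.cons_append, pvGoA, hall c (by simp), if_true, pvMapShift,
      ih rest (cnt + 1) (fun x hx => hall x (by simp [hx]))]
    have harg : cnt + 1 + (cs.length : Int) = cnt + ((c :: cs).length : Nat) := by
      simp only [List.length_cons]; push_cast; ring
    rw [harg]

theorem pvGoANonRun (p : Char → Bool) (f : Char → Int → Char) (run : List Char) :
    ∀ (rest : List Char) (cnt : Int), run ≠ [] → (∀ x ∈ run, p x = false) →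
    pvGoA p f (run ++ rest) cnt = run ++ pvGoA p f rest 0 := by
  induction run with
  | nil => intro _ _ h _; exact absurd rfl h
  | cons c cs ih =>
    intro rest cnt _ hall
    simp only [List.cons_append, pvGoA, hall c (by simp), if_false]
    cases cs with
    | nil => simp
    | cons c' cs' =>
      rw [ih rest 0 (by simp) (fun x hx => hall x (by simp [hx]))]
      simp

theorem pvGoAReset (p : Char → Bool) (f : Char → Int → Char) (lst : List Char) (cnt : Int) :
    pvGoA p f (lst.dropWhile p) cnt = pvGoA p f (lst.dropWhile p) 0 := by
  cases hd : lst.dropWhile p with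
  | nil => rfl
  | cons r rs =>
    have hr : p r = false := by
      have hne : lst.dropWhile p ≠ [] := by rw [hd]; simp
      have := List.head_dropWhile_not p hne
      simpa [hd] using this
    simp [pvGoA, hr]

theorem pvGoBRuns (al : List Char) (flag : Bool) : ∀ (n : Nat) (lst : List Char), lst.length ≤ n →
    pvGoA (fun k => al.contains (PySem.Chars.lowerChar k))
      (fun c cnt => altEncChar al flag cnt c) lst 0 = altRuns al flag lst := by
  intro n
  induction n with
  | zero =>
    intro lst hl
    rw [List.length_eq_zero_iff.mp (Nat.le_zero.mp hl), altRuns]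
    rfl
  | succ n ih =>
    intro lst hl
    cases lst with
    | nil => rw [altRuns]; rfl
    | cons c cs =>
      set p := fun k => al.contains (PySem.Chars.lowerChar k) with hp
      set f := fun (c : Char) (cnt : Int) => altEncChar al flag cnt c with hf
      rw [altRuns]
      by_cases h : al.contains (PySem.Chars.lowerChar c)
      · rw [dif_pos h]
        have hsplit : (c :: cs) = (c :: cs).takeWhile p ++ (c :: cs).dropWhile p :=
          (List.takeWhile_append_dropWhile).symm
        conv_lhs => rw [hsplit]
        rw [pvGoARun p f _ _ _ (fun x hx => List.mem_takeWhile_imp hx)]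
        rw [pvGoAReset p f (c :: cs) _]
        rw [ih _ (by have := pvDropWhileLt (p := p) (cs := cs) (by simpa [hp] using h); omega)]
        rw [pvMapShiftEnum]
        simp only [zero_add]
        rfl
      · rw [dif_neg h]
        have h' : (!p c) = true := by simp only [hp]; simpa using h
        have hsplit : (c :: cs) = (c :: cs).takeWhile (fun x => !p x) ++ (c :: cs).dropWhile (fun x => !p x) :=
          (List.takeWhile_append_dropWhile).symm
        conv_lhs => rw [hsplit]
        rw [pvGoANonRun p f _ _ _
          (by simp [h'])
          (fun x hx => by have := List.mem_takeWhile_imp hx; simpa using this)]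
        have hlen : (List.dropWhile (fun x => !p x) (c :: cs)).length ≤ n := by
          have := pvDropWhileLt (p := fun x => !p x) (cs := cs) h'
          simp only [List.length_cons] at this hl
          omega
        rw [ih _ hlen]

-- ===== VERDICT (by name: the statement is the Claim_ definition above) =====
theorem helper_spec : Claim_equal_helper := by
  intro text key flag _
  show helper text key flag = helper_alt text key flag
  rw [pvHelperEq, List.nil_append]
  unfold helper_alt
  rw [pvAlphaEq]
  set al : List Char := PySem.Set.ofList (key.toList ++ "abcdefghijklmnopqrstuvwxyz".toList) with hal
  have hnd : al.Nodup := by rw [hal]; exact PySem.Set.nodup_ofList _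
  congr 1
  have hp : (fun k => (pvDA key).contains (PySem.Chars.lowerChar k))
      = (fun k => al.contains (PySem.Chars.lowerChar k)) := by
    funext k
    rw [pvDAEq, ← hal, pvContainsDGen al hnd]
  rw [hp, pvEncEq, ← hal]
  exact pvGoBRuns al flag text.toList.length text.toList le_rfl
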